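-- pv_equiv track=rewrite | github.com/srndpty/kobato-eyes | src/core/search_parser.py | _collect_free
-- ===== SOURCE A (Python) =====
-- from typing import Sequence
--
-- def _collect_free(expr: str, used: Sequence[bool]) -> list[str]:
--     free: list[str] = []
--     length = len(expr)
--     index = 0
--     while index < length:
--         if expr[index].isspace():
--             index += 1
--             continue
--         start = index
--         while index < length and not expr[index].isspace():
--             index += 1
--         end = index
--         if not any(used[start:end]):
--             free.append(expr[start:end])
--     return free
-- ===== SOURCE B (Python) =====
-- def _collect_free(expr, used):
--     free = []
--     start = None          # start index of the currently open token, or None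
--     token_used = False    # has the open token touched a used position?
--     for i, ch in enumerate(expr):
--         if ch.isspace():
--             if start is not None and not token_used:
--                 free.append(expr[start:i])
--             start = None
--             token_used = False
--         else:
--             if start is None:
--                 start = i
--             if i < len(used) and used[i]:
--                 token_used = True
--     if start is not None and not token_used:
--         free.append(expr[start:])
--     return free
-- ===== Notes on version B (the rewrite author's own statement) =====
-- stated objective: alternative
-- what changed: Replaces A's nested while loops with explicit index arithmetic and slice-based used checks by a single forward pass over enumerate(expr) that carries the open token's start index and a token_used flag, flushing a token on each whitespace and once after the loop.
import Mathlib
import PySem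

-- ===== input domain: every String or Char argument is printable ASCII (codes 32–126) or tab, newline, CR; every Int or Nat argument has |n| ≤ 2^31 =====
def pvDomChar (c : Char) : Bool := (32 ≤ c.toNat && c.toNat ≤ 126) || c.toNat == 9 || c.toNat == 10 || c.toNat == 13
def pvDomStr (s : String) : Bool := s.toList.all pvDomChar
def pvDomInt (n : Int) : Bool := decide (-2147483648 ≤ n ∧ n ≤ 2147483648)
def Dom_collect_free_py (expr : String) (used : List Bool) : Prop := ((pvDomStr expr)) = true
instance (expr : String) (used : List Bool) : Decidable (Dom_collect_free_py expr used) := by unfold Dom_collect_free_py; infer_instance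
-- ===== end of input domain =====

-- B replaces A's nested index-chasing while loops by a single pass over enumerate(expr)
-- that carries the open token's start and a token_used flag (objective: alternative
-- decomposition; same O(n) cost).

-- ===== PORT A =====
-- inner while: 'while index < length and not expr[index].isspace(): index += 1'
def collectAInner (cs : List Char) (index : Nat) : Nat :=
  if h : index < cs.length then
    if PySem.Chars.isspace cs[index] = false then
      collectAInner cs (index + 1)
    else index
  else index
termination_by cs.length - index
decreasing_by omega

-- used by the outer loop's termination only
theorem lt_collectAInner (cs : List Char) (index : Nat) (h1 : index < cs.length)
    (h2 : PySem.Chars.isspace cs[index] = false) : index < collectAInner cs index := by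
  rw [collectAInner]
  have hge : ∀ k, collectAInner cs k ≥ k := by
    intro k
    fun_induction collectAInner cs k with
    | case1 j h hsp ih => omega
    | case2 j h hsp => omega
    | case3 j h => omega
  have := hge (index + 1)
  simp only [dif_pos h1, if_pos h2]
  omega

def collectALoop (cs : List Char) (used : List Bool) (free : List String) (index : Nat) :
    List String :=
  if h : index < cs.length then
    if hs : PySem.Chars.isspace cs[index] = true then
      collectALoop cs used free (index + 1)
    else
      let start := index
      let e := collectAInner cs index
      let free' :=
        if (PySem.List.slice used (some (start : Int)) (some (e : Int))).any id then free
        else free ++ [String.mk (PySem.List.slice cs (some (start : Int)) (some (e : Int)))]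
      collectALoop cs used free' e
  else free
termination_by cs.length - index
decreasing_by
  · omega
  · have := lt_collectAInner cs index h (by simpa using hs)
    omega

def collect_free_py (expr : String) (used : List Bool) : List String :=
  collectALoop expr.toList used [] 0

-- ===== PORT B =====
-- the loop body of Source B: state = (free, start, token_used)
def stepB (cs : List Char) (used : List Bool)
    (st : List String × Option Int × Bool) (p : Int × Char) :
    List String × Option Int × Bool :=
  let (free, start?, tokenUsed) := st
  let (i, ch) := p
  if PySem.Chars.isspace ch then
    let free' :=
      match start? with
      | some s => if tokenUsed then free
                  else free ++ [String.mk (PySem.List.slice cs (some s) (some i))]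
      | none => free
    (free', none, false)
  else
    let start' := match start? with | none => some i | some s => some s
    let tokenUsed' :=
      if i < (used.length : Int) && PySem.List.pyGetD used i false then true else tokenUsed
    (free, start', tokenUsed')

-- the 'if start is not None and not token_used' after the loop
def finishB (cs : List Char) (st : List String × Option Int × Bool) : List String :=
  match st with
  | (free, some s, tokenUsed) =>
      if tokenUsed then free else free ++ [String.mk (PySem.List.slice cs (some s) none)]
  | (free, none, _) => free

def collect_free_py_alt (expr : String) (used : List Bool) : List String :=
  let cs := expr.toList
  finishB cs ((PySem.List.enumerate cs 0).foldl (stepB cs used) ([], none, false))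

-- ===== PRECONDITION & SPEC =====
def Spec_collect_free_py (expr : String) (used : List Bool) (out : List String) : Prop := out = collect_free_py_alt expr used
instance (expr : String) (used : List Bool) (out : List String) : Decidable (Spec_collect_free_py expr used out) := by unfold Spec_collect_free_py; infer_instance

-- ===== CLAIM (what is proved, stated in full; the proofs are below) =====
def Claim_equal_collect_free_py : Prop := ∀ (expr : String) (used : List Bool), Dom_collect_free_py expr used → Spec_collect_free_py expr used (collect_free_py expr used)

-- ===== LEMMAS AND PROOFS =====

theorem collectAInner_spec (cs : List Char) (j : Nat) :
    (∀ k (hk : k < cs.length), j ≤ k → k < collectAInner cs j →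
        PySem.Chars.isspace cs[k] = false) ∧
    (∀ h : collectAInner cs j < cs.length, PySem.Chars.isspace cs[collectAInner cs j] = true) := by
  fun_induction collectAInner cs j with
  | case1 i h hsp ih =>
    obtain ⟨ih1, ih2⟩ := ih
    refine ⟨?_, ih2⟩
    intro k hk hjk hke
    rcases Nat.eq_or_lt_of_le hjk with rfl | hlt
    · exact hsp
    · exact ih1 k hk hlt hke
  | case2 i h hsp =>
    exact ⟨by omega, fun _ => by simpa using hsp⟩
  | case3 i h =>
    exact ⟨by omega, fun hlt => absurd hlt h⟩

theorem collectAInner_le (cs : List Char) (j : Nat) (hj : j ≤ cs.length) :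
    collectAInner cs j ≤ cs.length := by
  fun_induction collectAInner cs j with
  | case1 i h hsp ih => exact ih (by omega)
  | case2 i h hsp => omega
  | case3 i h => omega

-- the guard 'i < len(used)' is redundant once pyGetD defaults to false
theorem usedAt_eq (used : List Bool) (k : Nat) :
    ((decide ((k : Int) < (used.length : Int))) && PySem.List.pyGetD used (k : Int) false)
      = used.getD k false := by
  simp only [PySem.List.pyGetD_natCast, Nat.cast_lt, decide_eq_true_eq]
  by_cases h : k < used.length
  · simp [h]
  · simp [h, List.getD_eq_getElem?_getD, List.getElem?_eq_none (by omega : used.length ≤ k)]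

-- one non-space step of B from an open token
theorem stepB_token (cs : List Char) (used : List Bool) (s : Option Int) (k : Nat)
    (hk : k < cs.length) (hns : PySem.Chars.isspace cs[k] = false)
    (free : List String) (u : Bool) :
    stepB cs used (free, s, u) ((k : Int), cs[k])
      = (free, (match s with | none => some (k : Int) | some s => some s),
         u || used.getD k false) := by
  cases s <;>
  · simp only [stepB, hns, Bool.false_eq_true, if_false]
    rw [usedAt_eq]
    cases hu : used.getD k false <;> simp [hu]

theorem anyUsed_cons (used : List Bool) (k e : Nat) (h : k < e) :
    (used.getD k false || ((used.drop (k + 1)).take (e - (k + 1))).any id)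
      = ((used.drop k).take (e - k)).any id := by
  by_cases hk : k < used.length
  · rw [← List.getElem_cons_drop (as := used) (i := k) hk]
    have : e - k = (e - (k + 1)) + 1 := by omega
    rw [this, List.take_succ_cons, List.any_cons,
        List.getD_eq_getElem?_getD, List.getElem?_eq_getElem hk]
    rfl
  · have h1 : used.drop k = [] := List.drop_eq_nil_of_le (by omega)
    have h2 : used.drop (k + 1) = [] := List.drop_eq_nil_of_le (by omega)
    rw [h1, h2, List.getD_eq_getElem?_getD, List.getElem?_eq_none (by omega : used.length ≤ k)]
    simp

-- folding B's step across the rest of an open token accumulates 'any used on [k, e)'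
theorem foldB_token (cs : List Char) (used : List Bool) (s : Int) (e : Nat)
    (he : e ≤ cs.length) :
    ∀ k, k ≤ e →
    (∀ m (hm : m < cs.length), k ≤ m → m < e → PySem.Chars.isspace cs[m] = false) →
    ∀ (free : List String) (u : Bool),
      (PySem.List.enumerate (cs.drop k) (k : Int)).foldl (stepB cs used) (free, some s, u)
      = (PySem.List.enumerate (cs.drop e) (e : Int)).foldl (stepB cs used)
          (free, some s, u || ((used.drop k).take (e - k)).any id) := by
  intro k
  induction hn : e - k generalizing k with
  | zero =>
    intro hk _ free u
    have : k = e := by omega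
    subst this
    simp
  | succ n ih =>
    intro hk hseg free u
    have hke : k < e := by omega
    have hklen : k < cs.length := by omega
    rw [← List.getElem_cons_drop (as := cs) (i := k) hklen, PySem.List.enumerate_cons]
    simp only [List.foldl_cons]
    rw [stepB_token cs used (some s) k hklen (hseg k hklen (le_refl _) hke) free u]
    have hcast : (k : Int) + 1 = ((k + 1 : Nat) : Int) := by push_cast; ring
    rw [hcast, ih (k + 1) (by omega) (by omega)
      (fun m hm h1 h2 => hseg m hm (by omega) h2)]
    rw [show n = e - (k + 1) from by omega,
        show e - (k + 1) + 1 = e - k from by omega,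
        Bool.or_assoc, anyUsed_cons used k e hke]

-- main invariant: B's fold over the suffix from j, started in the closed state,
-- computes exactly A's outer loop from index j
theorem main_inv (cs : List Char) (used : List Bool) :
    ∀ n j, cs.length - j ≤ n → j ≤ cs.length → ∀ free : List String,
    finishB cs ((PySem.List.enumerate (cs.drop j) (j : Int)).foldl (stepB cs used)
        (free, none, false))
      = collectALoop cs used free j := by
  intro n
  induction n with
  | zero =>
    intro j hn hj free
    have : j = cs.length := by omega
    subst this
    rw [List.drop_length, collectALoop]
    simp [finishB]
  | succ n ih =>
    intro j hn hj free
    by_cases hjl : j < cs.length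
    · rw [← List.getElem_cons_drop (as := cs) (i := j) hjl, PySem.List.enumerate_cons]
      simp only [List.foldl_cons]
      by_cases hs : PySem.Chars.isspace cs[j] = true
      · -- whitespace: state stays closed, both sides advance to j+1
        have hstep : stepB cs used (free, none, false) ((j : Int), cs[j])
            = (free, none, false) := by
          simp [stepB, hs]
        rw [hstep]
        have hcast : (j : Int) + 1 = ((j + 1 : Nat) : Int) := by push_cast; ring
        rw [hcast, ih (j + 1) (by omega) (by omega) free]
        conv_rhs => rw [collectALoop]
        rw [dif_pos hjl, dif_pos hs]
      · -- a token starts at j and runs to e = collectAInner cs j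
        have hs' : PySem.Chars.isspace cs[j] = false := by simpa using hs
        have hje : j < collectAInner cs j := lt_collectAInner cs j hjl hs'
        have hel : collectAInner cs j ≤ cs.length := collectAInner_le cs j (by omega)
        obtain ⟨hnosp, hspE⟩ := collectAInner_spec cs j
        rw [stepB_token cs used none j hjl hs' free false]
        have hcast : (j : Int) + 1 = ((j + 1 : Nat) : Int) := by push_cast; ring
        rw [hcast,
          foldB_token cs used (j : Int) (collectAInner cs j) hel (j + 1) (by omega)
            (fun m hm h1 h2 => hnosp m hm (by omega) h2) free _]
        rw [Bool.false_or, anyUsed_cons used j (collectAInner cs j) hje]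
        -- unfold A's outer loop once: it emits the token [j, e) and continues at e
        conv_rhs => rw [collectALoop]
        rw [dif_pos hjl, dif_neg hs]
        simp only [PySem.List.slice_natCast]
        by_cases hEl : collectAInner cs j < cs.length
        · -- the token is closed by the whitespace at e
          rw [← List.getElem_cons_drop (as := cs) (i := collectAInner cs j) hEl,
            PySem.List.enumerate_cons]
          simp only [List.foldl_cons]
          have hstepE : stepB cs used
              (free, some (j : Int), ((used.drop j).take (collectAInner cs j - j)).any id)
              (((collectAInner cs j : Nat) : Int), cs[collectAInner cs j])
              = (if ((used.drop j).take (collectAInner cs j - j)).any id then free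
                 else free ++ [String.mk (List.take (collectAInner cs j - j) (List.drop j cs))],
                 none, false) := by
            simp only [stepB, hspE hEl, if_true, PySem.List.slice_natCast]
          rw [hstepE]
          have hcast2 : ((collectAInner cs j : Nat) : Int) + 1
              = ((collectAInner cs j + 1 : Nat) : Int) := by push_cast; ring
          rw [hcast2, ih (collectAInner cs j + 1) (by omega) (by omega) _]
          conv_rhs => rw [collectALoop]
          rw [dif_pos hEl, dif_pos (hspE hEl)]
        · -- the token runs to the end of the string
          have hdropE : cs.drop (collectAInner cs j) = [] := List.drop_eq_nil_of_le (by omega)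
          rw [hdropE]
          simp only [PySem.List.enumerate_nil, List.foldl_nil, finishB,
            PySem.List.slice_from_natCast]
          conv_rhs => rw [collectALoop]
          rw [dif_neg (by omega : ¬ collectAInner cs j < cs.length),
            List.take_of_length_le
              (show (List.drop j cs).length ≤ collectAInner cs j - j from by simp; omega)]
    · have : j = cs.length := by omega
      subst this
      rw [List.drop_length, collectALoop]
      simp [finishB]

-- ===== VERDICT (by name: the statement is the Claim_ definition above) =====
theorem collect_free_py_spec : Claim_equal_collect_free_py := by
  intro expr used _
  unfold Spec_collect_free_py collect_free_py collect_free_py_alt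
  rw [← main_inv expr.toList used expr.toList.length 0 (by omega) (by omega) []]
  simp
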